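-- pv_equiv track=rewrite | github.com/RomualdRousseau/Miniish | Software/Miniish/miniish/pyco/synth/synth.py | get_sample_size
-- ===== SOURCE A (Python) =====
-- def get_sample_size(s):
--     size = len(s)
--     for i in range(len(s)):
--         if s[-(i + 1)][2] == 0:
--             size -= 1
--         else:
--             break
--     return size
-- ===== SOURCE B (Python) =====
-- def get_sample_size(s):
--     size = 0
--     for i, t in enumerate(s):
--         if t[2] != 0:
--             size = i + 1
--     return size
-- ===== Notes on version B (the rewrite author's own statement) =====
-- stated objective: alternative
-- what changed: Replaces the backward scan with negative indexing and an early break by a single forward enumerate pass that keeps the index just past the last element whose third field is nonzero.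
import Mathlib
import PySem

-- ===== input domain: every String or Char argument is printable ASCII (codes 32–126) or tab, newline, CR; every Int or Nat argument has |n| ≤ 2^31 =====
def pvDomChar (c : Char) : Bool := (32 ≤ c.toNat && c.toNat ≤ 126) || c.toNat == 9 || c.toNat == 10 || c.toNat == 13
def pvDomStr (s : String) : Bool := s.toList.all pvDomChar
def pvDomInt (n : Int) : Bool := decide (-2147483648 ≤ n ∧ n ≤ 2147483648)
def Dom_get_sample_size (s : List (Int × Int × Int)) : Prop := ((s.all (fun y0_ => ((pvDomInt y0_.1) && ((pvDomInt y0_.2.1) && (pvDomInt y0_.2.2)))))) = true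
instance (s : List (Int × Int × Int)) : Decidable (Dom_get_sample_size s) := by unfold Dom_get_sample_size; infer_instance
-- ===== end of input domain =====

-- B changes the decomposition: a forward enumerate pass tracking the index past the
-- last nonzero-marked element, instead of A's backward scan with an early break.

-- ===== PORT A =====
-- the for-loop with break: i counts up, size is decremented while trailing third fields are 0
def pvALoop (s : List (Int × Int × Int)) (i : Nat) (size : Int) : Int :=
  if _h : i < s.length then
    match PySem.List.pyGet? s (-((i : Int) + 1)) with
    | some t => if t.2.2 = 0 then pvALoop s (i + 1) (size - 1) else size
    | none => size   -- unreachable: -(i+1) is in range when i < len s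
  else size
termination_by s.length - i

def get_sample_size (s : List (Int × Int × Int)) : Int :=
  pvALoop s 0 (s.length : Int)

-- ===== PORT B =====
def get_sample_size_alt (s : List (Int × Int × Int)) : Int :=
  (PySem.List.enumerate s 0).foldl (fun size p => if p.2.2.2 ≠ 0 then p.1 + 1 else size) 0

-- ===== PRECONDITION & SPEC =====
def Spec_get_sample_size (s : List (Int × Int × Int)) (out : Int) : Prop := out = get_sample_size_alt s
instance (s : List (Int × Int × Int)) (out : Int) : Decidable (Spec_get_sample_size s out) := by unfold Spec_get_sample_size; infer_instance

-- ===== CLAIM (what is proved, stated in full; the proofs are below) =====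
def Claim_equal_get_sample_size : Prop := ∀ (s : List (Int × Int × Int)), Dom_get_sample_size s → Spec_get_sample_size s (get_sample_size s)

-- ===== LEMMAS AND PROOFS =====

-- shifting the loop counter by one past an appended last element reads the same cells
theorem pvALoop_append (t : List (Int × Int × Int)) (x : Int × Int × Int)
    (i : Nat) (size : Int) : pvALoop (t ++ [x]) (i + 1) size = pvALoop t i size := by
  by_cases h : i < t.length
  · have hget : PySem.List.pyGet? (t ++ [x]) (-((↑(i + 1) : Int) + 1))
        = PySem.List.pyGet? t (-((i : Int) + 1)) := by
      have h1 : (-((↑(i + 1) : Int) + 1)) = -((i + 2 : Nat) : Int) := by push_cast; ring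
      have h2 : (-((i : Int) + 1)) = -((i + 1 : Nat) : Int) := by push_cast; ring
      rw [h1, h2,
        PySem.List.pyGet?_neg_natCast (t ++ [x]) (i + 2) (by omega) (by simp; omega),
        PySem.List.pyGet?_neg_natCast t (i + 1) (by omega) (by omega)]
      have hidx : (t ++ [x]).length - (i + 2) = t.length - (i + 1) := by simp
      rw [hidx, List.getElem?_append_left (by omega)]
    conv_lhs => rw [pvALoop]
    conv_rhs => rw [pvALoop]
    rw [dif_pos (show i + 1 < (t ++ [x]).length by simp; omega), dif_pos h, hget]
    cases hg : PySem.List.pyGet? t (-((i : Int) + 1)) with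
    | none => rfl
    | some y =>
      dsimp only
      by_cases hz : y.2.2 = 0
      · rw [if_pos hz, if_pos hz]
        exact pvALoop_append t x (i + 1) (size - 1)
      · simp [hz]
  · conv_lhs => rw [pvALoop]
    conv_rhs => rw [pvALoop]
    rw [dif_neg (show ¬ i + 1 < (t ++ [x]).length by simp; omega), dif_neg (by omega)]
termination_by t.length - i

theorem alt_append (t : List (Int × Int × Int)) (x : Int × Int × Int) :
    get_sample_size_alt (t ++ [x])
      = if x.2.2 ≠ 0 then (t.length : Int) + 1 else get_sample_size_alt t := by
  unfold get_sample_size_alt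
  rw [PySem.List.enumerate_append, List.foldl_append]
  simp [PySem.List.enumerate]

theorem a_eq_b (s : List (Int × Int × Int)) :
    get_sample_size s = get_sample_size_alt s := by
  induction s using List.reverseRecOn with
  | nil => simp [get_sample_size, get_sample_size_alt, pvALoop, PySem.List.enumerate]
  | append_singleton t x ih =>
    rw [alt_append]
    unfold get_sample_size
    conv_lhs => rw [pvALoop]
    rw [dif_pos (by simp)]
    simp only [Nat.cast_zero, zero_add, PySem.List.pyGet?_neg_one_append_singleton]
    by_cases hz : x.2.2 = 0
    · rw [if_pos hz, if_neg (by simp [hz])]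
      have hlen : ((t ++ [x]).length : Int) - 1 = (t.length : Int) := by simp
      rw [hlen, pvALoop_append t x 0]
      exact ih
    · simp [hz]

-- ===== VERDICT (by name: the statement is the Claim_ definition above) =====
theorem get_sample_size_spec : Claim_equal_get_sample_size := by
  intro s _
  unfold Spec_get_sample_size
  exact a_eq_b s
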